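-- pv_equiv track=rewrite | github.com/Zitzak/Advent-of-code-2019 | Day01/sample/CalcFuel.py | calc_fuel_for_fuel_from_mass
-- ===== SOURCE A (Python) =====
-- def calc_fuel_for_fuel_from_mass(mass):
--
-- 	temp = 0
-- 	fuel = 0
-- 	while mass is not 0 and mass > 0:
-- 		fuel += temp
-- 		temp = int(mass / 3) - 2
-- 		mass = temp
-- 	return fuel
-- ===== SOURCE B (Python) =====
-- def calc_fuel_for_fuel_from_mass(mass):
-- 	if mass <= 0:
-- 		return 0
-- 	f = int(mass / 3) - 2
-- 	if f <= 0:
-- 		return 0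
-- 	return f + calc_fuel_for_fuel_from_mass(f)
-- ===== Notes on version B (the rewrite author's own statement) =====
-- stated objective: simpler
-- what changed: Replaces the while loop with its delayed-accumulator (fuel += previous temp) by a direct recursion over the shrinking mass that adds each positive fuel value as it is computed.
import Mathlib
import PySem

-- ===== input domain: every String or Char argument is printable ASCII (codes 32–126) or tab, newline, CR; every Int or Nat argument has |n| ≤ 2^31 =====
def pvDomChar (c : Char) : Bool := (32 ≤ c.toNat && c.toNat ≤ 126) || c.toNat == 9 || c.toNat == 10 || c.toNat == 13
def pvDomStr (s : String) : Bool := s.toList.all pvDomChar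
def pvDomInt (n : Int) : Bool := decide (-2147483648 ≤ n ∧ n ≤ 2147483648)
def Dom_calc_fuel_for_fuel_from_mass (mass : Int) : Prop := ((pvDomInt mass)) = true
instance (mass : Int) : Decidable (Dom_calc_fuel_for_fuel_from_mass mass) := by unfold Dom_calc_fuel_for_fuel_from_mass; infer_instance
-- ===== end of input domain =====

-- B replaces A's while loop with its delayed accumulator (fuel += previous temp) by a
-- direct recursion that adds each positive fuel value as it is computed (objective: simpler).
-- NOTE on int(mass / 3): Python truncates float division toward zero; the expression is only
-- evaluated when mass > 0, and for 0 < mass ≤ 2^31 (the stated domain) the float quotient is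
-- close enough that int(mass / 3) = mass // 3 exactly, so both ports use Int ediv `mass / 3`.

-- ===== PORT A =====
-- A's while loop, state (mass, temp, fuel); guard `mass is not 0 and mass > 0` ≡ mass ≠ 0 ∧ mass > 0
def calcFuelLoopA (mass temp fuel : Int) : Int :=
  if _h : mass ≠ 0 ∧ mass > 0 then
    calcFuelLoopA (mass / 3 - 2) (mass / 3 - 2) (fuel + temp)
  else fuel
termination_by mass.toNat
decreasing_by omega

def calc_fuel_for_fuel_from_mass (mass : Int) : Int :=
  calcFuelLoopA mass 0 0

-- ===== PORT B =====
def calc_fuel_for_fuel_from_mass_alt (mass : Int) : Int :=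
  if mass ≤ 0 then 0
  else
    let f := mass / 3 - 2
    if f ≤ 0 then 0
    else f + calc_fuel_for_fuel_from_mass_alt f
termination_by mass.toNat
decreasing_by omega

-- ===== PRECONDITION & SPEC =====
def Spec_calc_fuel_for_fuel_from_mass (mass : Int) (out : Int) : Prop := out = calc_fuel_for_fuel_from_mass_alt mass
instance (mass : Int) (out : Int) : Decidable (Spec_calc_fuel_for_fuel_from_mass mass out) := by unfold Spec_calc_fuel_for_fuel_from_mass; infer_instance

-- ===== CLAIM (what is proved, stated in full; the proofs are below) =====
def Claim_equal_calc_fuel_for_fuel_from_mass : Prop := ∀ (mass : Int), Dom_calc_fuel_for_fuel_from_mass mass → Spec_calc_fuel_for_fuel_from_mass mass (calc_fuel_for_fuel_from_mass mass)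

-- ===== LEMMAS AND PROOFS =====

-- Loop invariant: from a state where mass = temp > 0 the loop returns fuel + mass + (B of mass).
theorem calcFuelLoopA_key (n : Nat) : ∀ (m fu : Int), m.toNat = n → 0 < m →
    calcFuelLoopA m m fu = fu + m + calc_fuel_for_fuel_from_mass_alt m := by
  induction n using Nat.strong_induction_on with
  | _ n ih =>
    intro m fu hn hm
    rw [calcFuelLoopA, calc_fuel_for_fuel_from_mass_alt]
    have hg : m ≠ 0 ∧ m > 0 := ⟨by omega, hm⟩
    simp only [dif_pos hg, if_neg (by omega : ¬ m ≤ 0)]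
    by_cases hf : m / 3 - 2 ≤ 0
    · rw [calcFuelLoopA]
      simp only [dif_neg (by omega : ¬ (m / 3 - 2 ≠ 0 ∧ m / 3 - 2 > 0))]
      simp only [if_pos hf]; ring
    · rw [ih (m / 3 - 2).toNat (by omega) _ _ rfl (by omega)]
      simp only [if_neg hf]; ring

-- ===== VERDICT (by name: the statement is the Claim_ definition above) =====
theorem calc_fuel_for_fuel_from_mass_spec : Claim_equal_calc_fuel_for_fuel_from_mass := by
  intro mass _
  unfold Spec_calc_fuel_for_fuel_from_mass calc_fuel_for_fuel_from_mass
  rw [calcFuelLoopA]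
  by_cases hm : 0 < mass
  · have hg : mass ≠ 0 ∧ mass > 0 := ⟨by omega, hm⟩
    simp only [dif_pos hg]
    rw [calc_fuel_for_fuel_from_mass_alt]
    simp only [if_neg (by omega : ¬ mass ≤ 0)]
    by_cases hf : mass / 3 - 2 ≤ 0
    · rw [calcFuelLoopA]
      simp only [dif_neg (by omega : ¬ (mass / 3 - 2 ≠ 0 ∧ mass / 3 - 2 > 0))]
      simp only [if_pos hf]; ring
    · rw [calcFuelLoopA_key (mass / 3 - 2).toNat _ _ rfl (by omega)]
      simp only [if_neg hf]; ring
  · simp only [dif_neg (by omega : ¬ (mass ≠ 0 ∧ mass > 0))]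
    rw [calc_fuel_for_fuel_from_mass_alt]
    simp only [if_pos (by omega : mass ≤ 0)]
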